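-- pv_equiv track=rewrite | github.com/manulabarbe/leadstreet-bi | scripts/load_budget.py | match_budget_name
-- ===== SOURCE A (Python) =====
-- BUDGET_TO_PRODUCTIVE_NAME = {
--     "Chloe": "Chloe De Smet",
--     "Nieuwe PMO": None,  # placeholder, skip
--     "Project manager": None,  # new hire role, skip
--     "Sales /CSM": None,  # new hire role, skip
--     "Developer": None,  # new hire role, skip
-- }
--
-- def match_budget_name(budget_name: str, productive_names: list[str]) -> str | None:
--     """Match a budget name to a Productive person name.
--
--     Tries: exact match → mapped name → first-name match → substring match.
--     Returns None if no match found.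
--     """
--     # Check explicit mapping first
--     if budget_name in BUDGET_TO_PRODUCTIVE_NAME:
--         return BUDGET_TO_PRODUCTIVE_NAME[budget_name]
--
--     # Exact match
--     if budget_name in productive_names:
--         return budget_name
--
--     # First name match (budget often uses just first name or short form)
--     budget_first = budget_name.split()[0].lower() if budget_name else ""
--     for pname in productive_names:
--         if pname.lower().startswith(budget_first):
--             return pname
--
--     # Substring match
--     budget_lower = budget_name.lower()
--     for pname in productive_names:
--         if budget_lower in pname.lower() or pname.lower() in budget_lower:
--             return pname
--
--     return None
-- ===== SOURCE B (Python) =====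
-- BUDGET_TO_PRODUCTIVE_NAME = {
--     "Chloe": "Chloe De Smet",
--     "Nieuwe PMO": None,  # placeholder, skip
--     "Project manager": None,  # new hire role, skip
--     "Sales /CSM": None,  # new hire role, skip
--     "Developer": None,  # new hire role, skip
-- }
--
-- def match_budget_name(budget_name: str, productive_names: list[str]) -> str | None:
--     """Single prioritized sweep: first-name match wins immediately; the first
--     substring match is kept as a fallback and returned only if no first-name
--     match exists anywhere."""
--     if budget_name in BUDGET_TO_PRODUCTIVE_NAME:
--         return BUDGET_TO_PRODUCTIVE_NAME[budget_name]
--     if budget_name in productive_names: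
--         return budget_name
--     budget_first = budget_name.split()[0].lower() if budget_name else ""
--     budget_lower = budget_name.lower()
--     fallback = None
--     for pname in productive_names:
--         pl = pname.lower()
--         if pl.startswith(budget_first):
--             return pname
--         if fallback is None and (budget_lower in pl or pl in budget_lower):
--             fallback = pname
--     return fallback
-- ===== Notes on version B (the rewrite author's own statement) =====
-- stated objective: alternative
-- what changed: A's two separate scans over productive_names (first-name pass, then substring pass) are replaced by a single prioritized sweep that returns immediately on a first-name match and keeps the first substring match as a fallback.
-- outside the precondition, e.g. on match_budget_name('   ', ['Ann']): A raises IndexError, B raises IndexError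
import Mathlib
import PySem

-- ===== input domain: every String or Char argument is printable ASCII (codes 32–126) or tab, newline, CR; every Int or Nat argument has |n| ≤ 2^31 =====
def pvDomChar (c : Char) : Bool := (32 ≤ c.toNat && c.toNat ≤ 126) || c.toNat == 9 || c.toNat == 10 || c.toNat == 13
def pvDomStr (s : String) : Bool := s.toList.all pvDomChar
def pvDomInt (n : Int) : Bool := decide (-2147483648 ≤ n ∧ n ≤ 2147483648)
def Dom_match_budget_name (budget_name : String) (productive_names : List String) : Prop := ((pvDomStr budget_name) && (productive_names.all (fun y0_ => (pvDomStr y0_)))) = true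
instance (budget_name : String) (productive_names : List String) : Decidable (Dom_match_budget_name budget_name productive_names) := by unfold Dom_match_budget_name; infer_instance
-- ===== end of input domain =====

-- B replaces A's two separate scans (first-name pass, then substring pass) by ONE
-- prioritized sweep keeping the first substring match as a fallback; same values, same cost class (objective: alternative).

-- ===== PORT A =====
-- the module-level BUDGET_TO_PRODUCTIVE_NAME dict (shared constant)
def budgetMap : PySem.Dict String (Option String) :=
  PySem.Dict.ofList [("Chloe", some "Chloe De Smet"), ("Nieuwe PMO", none),
    ("Project manager", none), ("Sales /CSM", none), ("Developer", none)]

-- A's first loop: first pname with pname.lower().startswith(budget_first)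
def aScan1 (bf : List Char) : List String → Option String
  | [] => none
  | p :: t =>
    if PySem.Chars.startswith (PySem.Chars.lower p.toList) bf then some p else aScan1 bf t

-- A's second loop: first pname with budget_lower in pname.lower() or pname.lower() in budget_lower
def aScan2 (bl : List Char) : List String → Option String
  | [] => none
  | p :: t =>
    if PySem.Chars.isIn bl (PySem.Chars.lower p.toList) || PySem.Chars.isIn (PySem.Chars.lower p.toList) bl
    then some p else aScan2 bl t

def match_budget_name (budget_name : String) (productive_names : List String) : Option String :=
  match budgetMap.get? budget_name with
  | some v => v
  | none =>
    if productive_names.contains budget_name then some budget_name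
    else
      -- budget_name.split()[0] : headD stands for [0]; Pre_ excludes the IndexError case (split() empty while budget_name truthy)
      let budget_first : List Char :=
        if budget_name.toList ≠ [] then
          PySem.Chars.lower ((PySem.Chars.split₀ budget_name.toList).headD [])
        else []
      match aScan1 budget_first productive_names with
      | some p => some p
      | none => aScan2 (PySem.Chars.lower budget_name.toList) productive_names

-- ===== PORT B =====
-- B's single loop: a first-name match returns at once; the first substring match is kept in `fallback`
def bSweep (bf bl : List Char) : List String → Option String → Option String
  | [], fallback => fallback
  | p :: t, fallback =>
    let pl := PySem.Chars.lower p.toList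
    if PySem.Chars.startswith pl bf then some p
    else if fallback.isNone && (PySem.Chars.isIn bl pl || PySem.Chars.isIn pl bl)
    then bSweep bf bl t (some p)
    else bSweep bf bl t fallback

def match_budget_name_alt (budget_name : String) (productive_names : List String) : Option String :=
  match budgetMap.get? budget_name with
  | some v => v
  | none =>
    if productive_names.contains budget_name then some budget_name
    else
      let budget_first : List Char :=
        if budget_name.toList ≠ [] then
          PySem.Chars.lower ((PySem.Chars.split₀ budget_name.toList).headD [])
        else []
      bSweep budget_first (PySem.Chars.lower budget_name.toList) productive_names none

-- ===== PRECONDITION & SPEC =====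
-- Pre_ excludes only the inputs where A raises IndexError: a nonempty budget_name consisting
-- entirely of whitespace, so that budget_name.split()[0] indexes an empty list.
def Pre_match_budget_name (budget_name : String) (_productive_names : List String) : Prop :=
  budget_name.toList = [] ∨ PySem.Chars.split₀ budget_name.toList ≠ []
instance (budget_name : String) (productive_names : List String) : Decidable (Pre_match_budget_name budget_name productive_names) := by unfold Pre_match_budget_name; infer_instance
def pvWitness_match_budget_name : String × List String := ("Bob", ["Bob Jones", "Ann"])

def Spec_match_budget_name (budget_name : String) (productive_names : List String) (out : Option String) : Prop := out = match_budget_name_alt budget_name productive_names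
instance (budget_name : String) (productive_names : List String) (out : Option String) : Decidable (Spec_match_budget_name budget_name productive_names out) := by unfold Spec_match_budget_name; infer_instance

-- ===== CLAIM (what is proved, stated in full; the proofs are below) =====
def Claim_equal_match_budget_name : Prop := ∀ (budget_name : String) (productive_names : List String), Dom_match_budget_name budget_name productive_names → Pre_match_budget_name budget_name productive_names → Spec_match_budget_name budget_name productive_names (match_budget_name budget_name productive_names)

-- ===== LEMMAS AND PROOFS =====

-- the single sweep equals: first-name scan, else the fallback if set, else the substring scan
theorem bSweep_eq (bf bl : List Char) (l : List String) (fb : Option String) :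
    bSweep bf bl l fb =
      match aScan1 bf l with
      | some p => some p
      | none => match fb with
        | some f => some f
        | none => aScan2 bl l := by
  induction l generalizing fb with
  | nil => cases fb <;> simp [bSweep, aScan1, aScan2]
  | cons p t ih =>
    simp only [bSweep, aScan1, aScan2]
    by_cases h1 : PySem.Chars.startswith (PySem.Chars.lower p.toList) bf
    · simp [h1]
    · by_cases h2 : PySem.Chars.isIn bl (PySem.Chars.lower p.toList) || PySem.Chars.isIn (PySem.Chars.lower p.toList) bl
      · cases fb with
        | none =>
          simp only [h1, h2, ih, Option.isNone, Bool.true_and, if_true, if_false,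
            Bool.false_eq_true]
        | some f => simp [h1, h2, ih]
      · cases fb <;> simp [h1, h2, ih]

-- ===== VERDICT (by name: the statement is the Claim_ definition above) =====
theorem match_budget_name_spec : Claim_equal_match_budget_name := by
  intro bn pn _ _
  unfold Spec_match_budget_name match_budget_name match_budget_name_alt
  cases budgetMap.get? bn with
  | some v => rfl
  | none =>
    simp only
    by_cases hc : bn ∈ pn
    · simp [hc]
    · simp only [List.contains_eq_mem, hc, decide_false, Bool.false_eq_true, if_false, bSweep_eq]
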